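-- pv_equiv track=rewrite | github.com/Hiddentale/meridian | backend/product_transform.py | _flatten_nutrition_rows
-- ===== SOURCE A (Python) =====
-- def _flatten_nutrition_rows(rows: list) -> list[tuple[str, str]]:
--     """Flatten the API nutrition rows, merging single-element continuation tokens."""
--     flat: list[tuple[str, str]] = []
--     pending_label = ""
--     pending_value = ""
--
--     for row in rows:
--         if len(row) == 0:
--             continue
--         elif len(row) == 1:
--             pending_label += " " + row[0]
--         else:
--             if pending_label or pending_value:
--                 flat.append((pending_label.strip(), (pending_value or "").strip()))
--             pending_label = row[0] or ""
--             pending_value = row[1] or ""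
--
--     if pending_label or pending_value:
--         flat.append((pending_label.strip(), (pending_value or "").strip()))
--
--     return flat
-- ===== SOURCE B (Python) =====
-- def _flatten_nutrition_rows(rows: list) -> list[tuple[str, str]]:
--     """Two-pass: group rows into segments, then render each segment."""
--     # Pass 1: leading single-element tokens, then segments = ((label, value), continuation tokens)
--     lead: list[str] = []
--     segments: list[tuple[tuple[str, str], list[str]]] = []
--     cur = None
--     for row in rows:
--         if not row:
--             continue
--         if len(row) == 1:
--             if cur is None:
--                 lead.append(row[0])
--             else:
--                 cur[1].append(row[0])
--         else:
--             if cur is not None: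
--                 segments.append(cur)
--             cur = ((row[0], row[1]), [])
--     if cur is not None:
--         segments.append(cur)
--
--     # Pass 2: render
--     out: list[tuple[str, str]] = []
--     if lead:
--         out.append((" ".join(lead).strip(), ""))
--     for (h0, h1), conts in segments:
--         if h0 == "" and h1 == "" and not conts:
--             continue
--         out.append((" ".join([h0] + conts).strip(), h1.strip()))
--     return out
-- ===== Notes on version B (the rewrite author's own statement) =====
-- stated objective: alternative
-- what changed: A interleaves grouping and output in one loop with lazy pending_label/pending_value accumulators and flush-on-next-multi; B first groups the rows into segments (leading single tokens, then (head,continuations) segments) and then renders each segment with ' '.join in a separate pass.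
import Mathlib
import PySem

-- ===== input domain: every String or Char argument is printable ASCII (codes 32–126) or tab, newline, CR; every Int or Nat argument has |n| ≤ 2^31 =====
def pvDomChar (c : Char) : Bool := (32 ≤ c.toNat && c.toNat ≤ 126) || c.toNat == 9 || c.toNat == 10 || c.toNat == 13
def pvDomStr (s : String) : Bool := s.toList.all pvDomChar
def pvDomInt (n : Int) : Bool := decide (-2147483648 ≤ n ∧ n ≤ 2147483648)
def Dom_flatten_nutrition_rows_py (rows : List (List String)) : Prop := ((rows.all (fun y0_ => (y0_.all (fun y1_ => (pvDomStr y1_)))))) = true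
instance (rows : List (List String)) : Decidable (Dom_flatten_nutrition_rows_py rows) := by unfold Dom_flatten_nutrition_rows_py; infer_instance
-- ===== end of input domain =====

-- B replaces A's single lazy accumulator loop by a two-pass decomposition (group rows into
-- segments, then render each segment); objective: alternative structure, same cost.


-- ===== PORT A =====
-- A's loop body: state = (flat, pending_label, pending_value)
def flattenStep (st : List (String × String) × String × String) (row : List String) :
    List (String × String) × String × String :=
  match row with
  | [] => st
  | [x] => (st.1, st.2.1 ++ " " ++ x, st.2.2)
  | x :: y :: _ =>
      ((if st.2.1 ≠ "" ∨ st.2.2 ≠ "" then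
          st.1 ++ [(PySem.Str.strip st.2.1, PySem.Str.strip st.2.2)]
        else st.1),
       (if x ≠ "" then x else ""), (if y ≠ "" then y else ""))

-- A's trailing flush
def flattenFinish (st : List (String × String) × String × String) : List (String × String) :=
  if st.2.1 ≠ "" ∨ st.2.2 ≠ "" then
    st.1 ++ [(PySem.Str.strip st.2.1, PySem.Str.strip st.2.2)]
  else st.1

def flatten_nutrition_rows_py (rows : List (List String)) : List (String × String) :=
  flattenFinish (rows.foldl flattenStep ([], "", ""))

-- ===== PORT B =====
-- B pass 1 loop body: state = (lead tokens, finished segments, current segment?)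
def segStep
    (st : List String × List ((String × String) × List String) × Option ((String × String) × List String))
    (row : List String) :
    List String × List ((String × String) × List String) × Option ((String × String) × List String) :=
  match row with
  | [] => st
  | [x] =>
      match st.2.2 with
      | none => (st.1 ++ [x], st.2.1, none)
      | some c => (st.1, st.2.1, some (c.1, c.2 ++ [x]))
  | x :: y :: _ =>
      match st.2.2 with
      | none => (st.1, st.2.1, some ((x, y), []))
      | some c => (st.1, st.2.1 ++ [c], some ((x, y), []))

-- B pass 2 loop body
def renderStep (out : List (String × String)) (seg : (String × String) × List String) :
    List (String × String) :=
  if seg.1.1 = "" ∧ seg.1.2 = "" ∧ seg.2 = [] then out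
  else out ++ [(PySem.Str.strip (PySem.Str.join " " (seg.1.1 :: seg.2)), PySem.Str.strip seg.1.2)]

def segRender
    (st : List String × List ((String × String) × List String) × Option ((String × String) × List String)) :
    List (String × String) :=
  (match st.2.2 with | none => st.2.1 | some c => st.2.1 ++ [c]).foldl renderStep
    (if st.1 ≠ [] then [(PySem.Str.strip (PySem.Str.join " " st.1), "")] else [])

def flatten_nutrition_rows_py_alt (rows : List (List String)) : List (String × String) :=
  segRender (rows.foldl segStep ([], [], none))

-- ===== PRECONDITION & SPEC =====
def Spec_flatten_nutrition_rows_py (rows : List (List String)) (out : List (String × String)) : Prop := out = flatten_nutrition_rows_py_alt rows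
instance (rows : List (List String)) (out : List (String × String)) : Decidable (Spec_flatten_nutrition_rows_py rows out) := by unfold Spec_flatten_nutrition_rows_py; infer_instance

-- ===== CLAIM (what is proved, stated in full; the proofs are below) =====
def Claim_equal_flatten_nutrition_rows_py : Prop := ∀ (rows : List (List String)), Dom_flatten_nutrition_rows_py rows → Spec_flatten_nutrition_rows_py rows (flatten_nutrition_rows_py rows)

-- ===== LEMMAS AND PROOFS =====

-- A's pending_label after the leading single-element rows `l`
def catL (l : List String) : String := l.foldl (fun s x => s ++ " " ++ x) ""
-- A's pending_label for a segment with head label h and continuation tokens `l`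
def catS (h : String) (l : List String) : String := l.foldl (fun s x => s ++ " " ++ x) h
-- what the leading segment contributes to the output
def renderLead (l : List String) : List (String × String) :=
  if l = [] then [] else [(PySem.Str.strip (PySem.Str.join " " l), "")]
-- what one ordinary segment contributes to the output
def renderSeg (seg : (String × String) × List String) : List (String × String) :=
  if seg.1.1 = "" ∧ seg.1.2 = "" ∧ seg.2 = [] then []
  else [(PySem.Str.strip (PySem.Str.join " " (seg.1.1 :: seg.2)), PySem.Str.strip seg.1.2)]
-- A's state corresponding to a B pass-1 state
def absA
    (st : List String × List ((String × String) × List String) × Option ((String × String) × List String)) :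
    List (String × String) × String × String :=
  match st.2.2 with
  | none => ([], catL st.1, "")
  | some c => (renderLead st.1 ++ st.2.1.flatMap renderSeg, catS c.1.1 c.2, c.1.2)
-- invariant of B's pass-1 states: no finished segment before the first multi-element row
def InvB
    (st : List String × List ((String × String) × List String) × Option ((String × String) × List String)) :
    Prop := st.2.2 = none → st.2.1 = []

theorem toList_space : (" " : String).toList = [' '] := rfl

theorem join_single (x : String) : PySem.Str.join " " [x] = x := by
  rw [← String.toList_inj]
  simp [PySem.Str.toList_join, PySem.Chars.join_singleton]

theorem join_cons₂ (x y : String) (rest : List String) :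
    PySem.Str.join " " (x :: y :: rest) = x ++ " " ++ PySem.Str.join " " (y :: rest) := by
  rw [← String.toList_inj]
  simp [PySem.Str.toList_join, String.toList_append, PySem.Chars.join_cons_cons]

theorem foldl_cat : ∀ (l : List String) (s0 : String), l ≠ [] →
    l.foldl (fun s x => s ++ " " ++ x) s0 = s0 ++ " " ++ PySem.Str.join " " l := by
  intro l
  induction l with
  | nil => intro s0 h; exact absurd rfl h
  | cons x rest ih =>
    intro s0 _
    cases rest with
    | nil => simp [List.foldl, join_single]
    | cons y rest' =>
      rw [List.foldl_cons, ih _ (by simp), join_cons₂]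
      rw [← String.toList_inj]
      simp [String.toList_append]

theorem catL_eq (l : List String) (h : l ≠ []) : catL l = " " ++ PySem.Str.join " " l := by
  unfold catL
  rw [foldl_cat l "" h, ← String.toList_inj]
  simp [String.toList_append]

theorem catS_eq (h : String) (l : List String) : catS h l = PySem.Str.join " " (h :: l) := by
  unfold catS
  cases l with
  | nil => simp [List.foldl, join_single]
  | cons y rest => rw [foldl_cat _ _ (by simp), join_cons₂]

theorem space_ne (t : String) : " " ++ t ≠ "" := by
  intro h
  have h2 := congrArg String.toList h
  simp [String.toList_append, toList_space] at h2

theorem app_space_ne (s t : String) : s ++ " " ++ t ≠ "" := by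
  intro h
  have h2 := congrArg String.toList h
  simp [String.toList_append, toList_space] at h2

theorem strip_empty : PySem.Str.strip "" = "" := rfl

theorem strip_space (s : String) : PySem.Str.strip (" " ++ s) = PySem.Str.strip s := by
  have hsp : PySem.Chars.isspace ' ' = true := by decide
  rw [← String.toList_inj]
  simp [PySem.Str.toList_strip, String.toList_append, toList_space,
    PySem.Chars.strip, PySem.Chars.lstrip, hsp]

theorem catS_empty_iff (h : String) (l : List String) : catS h l = "" ↔ h = "" ∧ l = [] := by
  cases l with
  | nil => simp [catS, List.foldl]
  | cons y rest =>
    rw [catS_eq, join_cons₂]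
    simp [app_space_ne h (PySem.Str.join " " (y :: rest))]

theorem orE (x : String) : (if x ≠ "" then x else "") = x := by
  by_cases h : x = "" <;> simp [h]

-- A's conditional flush of a segment's pending pair equals appending renderSeg
theorem flush_eq (F : List (String × String)) (h0 h1 : String) (conts : List String) :
    (if catS h0 conts ≠ "" ∨ h1 ≠ "" then
        F ++ [(PySem.Str.strip (catS h0 conts), PySem.Str.strip h1)]
      else F)
    = F ++ renderSeg ((h0, h1), conts) := by
  unfold renderSeg
  by_cases hc : h0 = "" ∧ h1 = "" ∧ conts = []
  · obtain ⟨ha, hb, hcc⟩ := hc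
    subst ha; subst hb; subst hcc
    simp [catS]
  · have hne : catS h0 conts ≠ "" ∨ h1 ≠ "" := by
      by_contra hn
      obtain ⟨hx, hy⟩ := not_or.mp hn
      rw [not_ne_iff] at hx hy
      rw [catS_empty_iff] at hx
      exact hc ⟨hx.1, hy, hx.2⟩
    rw [if_pos hne, if_neg hc, catS_eq]

-- A's conditional flush of the leading pending label equals renderLead
theorem flushLead_eq (lead : List String) :
    (if catL lead ≠ "" ∨ ("" : String) ≠ "" then
        [(PySem.Str.strip (catL lead), PySem.Str.strip "")]
      else ([] : List (String × String)))
    = renderLead lead := by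
  unfold renderLead
  by_cases hl : lead = []
  · subst hl; simp [catL]
  · rw [catL_eq lead hl]
    simp [strip_space, strip_empty, hl, space_ne (PySem.Str.join " " lead)]

theorem out0_eq (lead : List String) :
    (if lead ≠ [] then [(PySem.Str.strip (PySem.Str.join " " lead), "")]
     else ([] : List (String × String))) = renderLead lead := by
  unfold renderLead
  by_cases hl : lead = [] <;> simp [hl]

theorem renderStep_eq (out : List (String × String)) (seg : (String × String) × List String) :
    renderStep out seg = out ++ renderSeg seg := by
  unfold renderStep renderSeg
  split_ifs <;> simp

theorem foldl_render : ∀ (l : List ((String × String) × List String)) (out0 : List (String × String)),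
    l.foldl renderStep out0 = out0 ++ l.flatMap renderSeg := by
  intro l
  induction l with
  | nil => simp
  | cons seg rest ih =>
    intro out0
    simp only [List.foldl, List.flatMap_cons]
    rw [renderStep_eq, ih, List.append_assoc]

theorem inv_step
    (st : List String × List ((String × String) × List String) × Option ((String × String) × List String))
    (row : List String) (h : InvB st) : InvB (segStep st row) := by
  obtain ⟨lead, segs, cur⟩ := st
  rcases row with _ | ⟨x, _ | ⟨y, rest⟩⟩ <;> cases cur <;>
    simp_all [segStep, InvB]

theorem step_comm
    (st : List String × List ((String × String) × List String) × Option ((String × String) × List String))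
    (row : List String) (hinv : InvB st) :
    flattenStep (absA st) row = absA (segStep st row) := by
  obtain ⟨lead, segs, cur⟩ := st
  cases cur with
  | none =>
    have hs : segs = [] := hinv rfl
    subst hs
    rcases row with _ | ⟨x, _ | ⟨y, rest⟩⟩
    · rfl
    · show (([] : List (String × String)), catL lead ++ " " ++ x, ("" : String))
          = ([], catL (lead ++ [x]), "")
      simp [catL, List.foldl_append]
    · show ((if catL lead ≠ "" ∨ ("" : String) ≠ "" then
              [] ++ [(PySem.Str.strip (catL lead), PySem.Str.strip "")]
            else ([] : List (String × String))),
           (if x ≠ "" then x else ""), (if y ≠ "" then y else ""))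
          = (renderLead lead ++ [], x, y)
      rw [orE x, orE y, List.nil_append, flushLead_eq]
      simp
  | some c =>
    obtain ⟨⟨h0, h1⟩, conts⟩ := c
    rcases row with _ | ⟨x, _ | ⟨y, rest⟩⟩
    · rfl
    · show (renderLead lead ++ segs.flatMap renderSeg, catS h0 conts ++ " " ++ x, h1)
          = (renderLead lead ++ segs.flatMap renderSeg, catS h0 (conts ++ [x]), h1)
      simp [catS, List.foldl_append]
    · show ((if catS h0 conts ≠ "" ∨ h1 ≠ "" then
              (renderLead lead ++ segs.flatMap renderSeg) ++
                [(PySem.Str.strip (catS h0 conts), PySem.Str.strip h1)]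
            else renderLead lead ++ segs.flatMap renderSeg),
           (if x ≠ "" then x else ""), (if y ≠ "" then y else ""))
          = (renderLead lead ++ (segs ++ [((h0, h1), conts)]).flatMap renderSeg, x, y)
      rw [orE x, orE y, flush_eq]
      simp [List.flatMap_append, List.append_assoc]

theorem foldl_comm : ∀ (rows : List (List String))
    (st : List String × List ((String × String) × List String) × Option ((String × String) × List String)),
    InvB st → rows.foldl flattenStep (absA st) = absA (rows.foldl segStep st) := by
  intro rows
  induction rows with
  | nil => intro st _; rfl
  | cons r rest ih =>
    intro st h
    simp only [List.foldl]
    rw [step_comm st r h]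
    exact ih _ (inv_step st r h)

theorem inv_foldl : ∀ (rows : List (List String))
    (st : List String × List ((String × String) × List String) × Option ((String × String) × List String)),
    InvB st → InvB (rows.foldl segStep st) := by
  intro rows
  induction rows with
  | nil => intro st h; exact h
  | cons r rest ih => intro st h; exact ih _ (inv_step st r h)

theorem finish_eq
    (st : List String × List ((String × String) × List String) × Option ((String × String) × List String))
    (h : InvB st) : flattenFinish (absA st) = segRender st := by
  obtain ⟨lead, segs, cur⟩ := st
  cases cur with
  | none =>
    have hs : segs = [] := h rfl
    subst hs
    show (if catL lead ≠ "" ∨ ("" : String) ≠ "" then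
            [] ++ [(PySem.Str.strip (catL lead), PySem.Str.strip "")]
          else ([] : List (String × String)))
        = segRender (lead, [], none)
    rw [List.nil_append, flushLead_eq, ← out0_eq]
    rfl
  | some c =>
    obtain ⟨⟨h0, h1⟩, conts⟩ := c
    show (if catS h0 conts ≠ "" ∨ h1 ≠ "" then
            (renderLead lead ++ segs.flatMap renderSeg) ++
              [(PySem.Str.strip (catS h0 conts), PySem.Str.strip h1)]
          else renderLead lead ++ segs.flatMap renderSeg)
        = (segs ++ [((h0, h1), conts)]).foldl renderStep
            (if lead ≠ [] then [(PySem.Str.strip (PySem.Str.join " " lead), "")] else [])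
    rw [flush_eq, foldl_render, out0_eq]
    simp [List.flatMap_append, List.append_assoc]

-- ===== VERDICT (by name: the statement is the Claim_ definition above) =====
theorem flatten_nutrition_rows_py_spec : Claim_equal_flatten_nutrition_rows_py := by
  intro rows _
  unfold Spec_flatten_nutrition_rows_py flatten_nutrition_rows_py flatten_nutrition_rows_py_alt
  have h0 : (([], "", "") : List (String × String) × String × String) = absA ([], [], none) := rfl
  rw [h0, foldl_comm rows ([], [], none) (by intro _; rfl)]
  exact finish_eq _ (inv_foldl rows ([], [], none) (by intro _; rfl))
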